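-- pv_equiv track=rewrite | github.com/joxerx/stat_beginner | main.py | mode_stat
-- ===== SOURCE A (Python) =====
-- def count_appearances(data):  # Формирование словаря, который считает количество вхождений того или иного значения
--     result = {}
--     for x in data:
--         if x not in result:
--             result[x] = 1
--         else:
--             result[x] += 1
--     return result
--
-- def mode_stat(data):  # Мода выборки
--     data_dict = count_appearances(data)
--     modes = []
--     max_count = 0
--
--     for key in data_dict:
--         if data_dict[key] > max_count:
--             max_count = data_dict[key]
--             modes.clear()
--             modes.append(key)
--         elif data_dict[key] == max_count:
--             modes.append(key)
--     return modes
-- ===== SOURCE B (Python) =====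
-- def mode_stat(data):  # mode(s) via sort: runs of a sorted copy give the counts; no frequency dict
--     if not data:
--         return []
--     s = sorted(data)
--     best, run, mode_vals = 1, 1, {s[0]}
--     for prev, cur in zip(s, s[1:]):
--         run = run + 1 if cur == prev else 1
--         if run > best:
--             best, mode_vals = run, {cur}
--         elif run == best:
--             mode_vals.add(cur)
--     seen = set()
--     out = []
--     for x in data:
--         if x in mode_vals and x not in seen:
--             out.append(x)
--             seen.add(x)
--     return out
-- ===== Notes on version B (the rewrite author's own statement) =====
-- stated objective: alternative
-- what changed: Replaces A's hash-count (dict of frequencies scanned with a running max) by a sort-based algorithm: sort a copy, read the maximal run length and the set of values attaining it off the runs of the sorted list, then collect those values in first-seen order in one pass over the original list.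
import Mathlib
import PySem

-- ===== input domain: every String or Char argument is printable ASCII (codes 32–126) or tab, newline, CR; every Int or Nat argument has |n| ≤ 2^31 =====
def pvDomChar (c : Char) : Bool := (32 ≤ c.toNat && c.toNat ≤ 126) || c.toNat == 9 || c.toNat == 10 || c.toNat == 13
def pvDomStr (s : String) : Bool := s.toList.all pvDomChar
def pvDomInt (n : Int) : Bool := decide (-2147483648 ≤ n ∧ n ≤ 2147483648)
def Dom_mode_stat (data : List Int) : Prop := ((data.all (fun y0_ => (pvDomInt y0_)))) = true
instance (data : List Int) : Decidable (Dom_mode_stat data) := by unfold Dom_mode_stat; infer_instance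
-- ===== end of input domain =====

-- B replaces A's frequency dict with a sort: the counts are read off as runs of a sorted copy,
-- tied modes are then collected in first-seen order; a different algorithm, not claimed faster.

-- ===== PORT A =====
-- helper count_appearances: 'if x not in result: result[x] = 1 else: result[x] += 1'
def countAppearances (data : List Int) : PySem.Dict Int Int :=
  data.foldl
    (fun result x =>
      if result.contains x = false then result.insert x 1 else result.modify x 0 (· + 1))
    PySem.Dict.empty

-- 'for key in data_dict:'; data_dict[key] is total here (key ∈ keys), ported as getD key 0
def mode_stat (data : List Int) : List Int :=
  ((countAppearances data).keys.foldl
    (fun s key =>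
      if (countAppearances data).getD key 0 > s.2 then ([key], (countAppearances data).getD key 0)
      else if (countAppearances data).getD key 0 = s.2 then (s.1 ++ [key], s.2)
      else s)
    ([], 0)).1

-- ===== PORT B =====
-- 'if not data: return []'; s = sorted(data); the zip(s, s[1:]) run-scan with state
-- (best, run, mode_vals); then the first-seen collection loop with state (seen, out)
def mode_stat_alt (data : List Int) : List Int :=
  if data.isEmpty then []
  else
    match PySem.List.sorted data (fun x => x) false with
    | [] => []  -- unreachable (sorted of a nonempty list is nonempty); mirrors s[0] which cannot fail
    | s0 :: stl =>
      (data.foldl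
        (fun (so : PySem.Set Int × List Int) x =>
          if (((s0 :: stl).zip stl).foldl
                (fun (b : Int × Int × PySem.Set Int) pc =>
                  let r := if pc.2 == pc.1 then b.2.1 + 1 else 1
                  if r > b.1 then (r, r, PySem.Set.ofList [pc.2])
                  else if r == b.1 then (b.1, r, PySem.Set.add b.2.2 pc.2)
                  else (b.1, r, b.2.2))
                (1, 1, PySem.Set.ofList [s0])).2.2.contains x && !so.1.contains x
          then (PySem.Set.add so.1 x, so.2 ++ [x]) else so)
        (PySem.Set.empty, [])).2

-- ===== PRECONDITION & SPEC =====
def Spec_mode_stat (data : List Int) (out : List Int) : Prop := out = mode_stat_alt data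
instance (data : List Int) (out : List Int) : Decidable (Spec_mode_stat data out) := by unfold Spec_mode_stat; infer_instance

-- ===== CLAIM (what is proved, stated in full; the proofs are below) =====
def Claim_equal_mode_stat : Prop := ∀ (data : List Int), Dom_mode_stat data → Spec_mode_stat data (mode_stat data)

-- ===== LEMMAS AND PROOFS =====

-- A's counting helper is exactly collections.Counter
theorem countAppearances_eq_counter (data : List Int) :
    countAppearances data = PySem.Dict.counter data := by
  rw [PySem.Dict.counter_eq_foldl]
  unfold countAppearances
  apply PySem.List.foldl_congr_mem
  intro d x _
  by_cases h : d.contains x = false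
  · simp [h, PySem.Dict.insert, PySem.Dict.modify, PySem.Dict.getD_of_not_contains d 0 h]
  · simp [h]

-- A's loop over (key, count) pairs computes "keys whose count equals the running max", with the
-- final accumulator's second component being the fold of max
theorem loopA_eq (l : List (Int × Int)) (modes : List Int) (mc : Int) :
    l.foldl
      (fun s p =>
        if p.2 > s.2 then ([p.1], p.2)
        else if p.2 = s.2 then (s.1 ++ [p.1], s.2)
        else s) (modes, mc)
    = ((if l.foldl (fun a p => max a p.2) mc = mc then modes else [])
        ++ (l.filter (fun p => p.2 == l.foldl (fun a p => max a p.2) mc)).map Prod.fst,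
       l.foldl (fun a p => max a p.2) mc) := by
  induction l generalizing modes mc with
  | nil => simp
  | cons p t ih =>
    obtain ⟨k, c⟩ := p
    simp only [List.foldl_cons]
    by_cases hc : c > mc
    · rw [show (if (k, c).2 > (modes, mc).2 then ([(k, c).1], (k, c).2)
            else if (k, c).2 = (modes, mc).2 then ((modes, mc).1 ++ [(k, c).1], (modes, mc).2)
            else (modes, mc)) = ([k], c) by simp [hc]]
      simp only [show max mc c = c by omega]
      rw [ih [k] c]
      have hle : c ≤ t.foldl (fun a p => max a p.2) c :=
        (PySem.List.le_foldl_max_int t (fun p => p.2) c).1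
      have hne : t.foldl (fun a p => max a p.2) c ≠ mc := by omega
      by_cases hM : t.foldl (fun a p => max a p.2) c = c
      · simp only [hM]
        simp
        exact fun h => absurd h (by omega)
      · have : ¬ ((k, c).2 == t.foldl (fun a p => max a p.2) c) = true := by
          simpa using fun h => hM h.symm
        simp [hM, hne, this]
    · by_cases he : c = mc
      · rw [show (if (k, c).2 > (modes, mc).2 then ([(k, c).1], (k, c).2)
              else if (k, c).2 = (modes, mc).2 then ((modes, mc).1 ++ [(k, c).1], (modes, mc).2)
              else (modes, mc)) = (modes ++ [k], mc) by simp [he]]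
        simp only [show max mc c = mc by omega]
        rw [ih (modes ++ [k]) mc]
        by_cases hM : t.foldl (fun a p => max a p.2) mc = mc
        · simp [hM, he]
        · have hcne : (c == List.foldl (fun a p => max a p.2) mc t) = false := by
            rw [beq_eq_false_iff_ne]
            exact fun h => hM (by omega)
          simp [hM, hcne]
      · rw [show (if (k, c).2 > (modes, mc).2 then ([(k, c).1], (k, c).2)
              else if (k, c).2 = (modes, mc).2 then ((modes, mc).1 ++ [(k, c).1], (modes, mc).2)
              else (modes, mc)) = (modes, mc) by simp [he]; omega]
        simp only [show max mc c = mc by omega]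
        rw [ih modes mc]
        have hle : mc ≤ t.foldl (fun a p => max a p.2) mc :=
          (PySem.List.le_foldl_max_int t (fun p => p.2) mc).1
        have : ¬ ((k, c).2 == t.foldl (fun a p => max a p.2) mc) = true := by
          simpa using fun h => by omega
        simp [this]


theorem foldl_add_cons (a : Int) (s : PySem.Set Int) (l : List Int)
    (h : ∀ y ∈ l, (y == a) = false) :
    l.foldl PySem.Set.add (a :: s) = a :: l.foldl PySem.Set.add s := by
  induction l generalizing s with
  | nil => rfl
  | cons y t ih =>
    have hy := h y List.mem_cons_self
    have hne : y ≠ a := by simpa using hy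
    simp only [List.foldl_cons]
    have hadd : PySem.Set.add (a :: s) y = a :: PySem.Set.add s y := by
      unfold PySem.Set.add PySem.Set.contains
      simp only [List.contains_cons]
      have h1 : (y == a) = false := by simpa using hne
      rw [h1]
      simp only [Bool.false_or]
      split <;> simp
    rw [hadd, ih _ (fun z hz => h z (List.mem_cons_of_mem _ hz))]

theorem foldl_add_filter (x : Int) (s : PySem.Set Int) (l : List Int) (hx : x ∈ s) :
    l.foldl PySem.Set.add s = (l.filter (fun y => !(y == x))).foldl PySem.Set.add s := by
  induction l generalizing s with
  | nil => rfl
  | cons y t ih =>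
    by_cases hy : y = x
    · subst hy
      have : PySem.Set.add s y = s := by
        simp [PySem.Set.add, PySem.Set.contains, hx]
      simp [List.foldl_cons, this, ih s hx]
    · have hmem : x ∈ PySem.Set.add s y := by
        rw [PySem.Set.mem_add]; exact Or.inl hx
      simp [hy, List.foldl_cons, ih _ hmem]

theorem ofList_cons (x : Int) (l : List Int) :
    PySem.Set.ofList (x :: l) = x :: PySem.Set.ofList (l.filter (fun y => !(y == x))) := by
  show List.foldl _ PySem.Set.empty (x :: l) = _
  have h0 : PySem.Set.add PySem.Set.empty x = [x] := rfl
  rw [List.foldl_cons, h0, foldl_add_filter x [x] l (by simp),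
    foldl_add_cons x [] _ (by intro y hy; simp at hy ⊢; exact hy.2)]
  rfl

theorem ofList_filter (P : Int → Bool) (l : List Int) :
    PySem.Set.ofList (l.filter P) = (PySem.Set.ofList l).filter P := by
  induction hn : l.length using Nat.strong_induction_on generalizing l with
  | _ n ih =>
  cases l with
  | nil => rfl
  | cons x t =>
    have hlen : ∀ Q : Int → Bool, (t.filter Q).length < n := by
      intro Q; have := List.length_filter_le Q t; simp at hn; omega
    by_cases hP : P x = true
    · rw [List.filter_cons_of_pos hP, ofList_cons, ofList_cons x t,
        List.filter_comm, ih _ (hlen _) _ rfl, List.filter_cons_of_pos hP]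
    · rw [List.filter_cons_of_neg (by simp [hP]), ofList_cons x t,
        List.filter_cons_of_neg (by simp [hP]), ← ih _ (hlen (fun y => !(y == x))) _ rfl,
        ← List.filter_comm]
      congr 1
      have : ∀ y ∈ t.filter P, (fun y => !(y == x)) y = true := by
        intro y hy
        have hyP := List.of_mem_filter hy
        simp only [Bool.not_eq_eq_eq_not, Bool.not_true, beq_eq_false_iff_ne]
        rintro rfl; rw [hyP] at hP; exact hP rfl
      exact (List.filter_eq_self.mpr this).symm

theorem loop2_eq (mv : PySem.Set Int) (data : List Int) (seen : PySem.Set Int) (out : List Int) :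
    (data.foldl
      (fun (so : PySem.Set Int × List Int) x =>
        if mv.contains x && !so.1.contains x then (PySem.Set.add so.1 x, so.2 ++ [x]) else so)
      (seen, out)).2
    = out ++ PySem.Set.ofList (data.filter (fun x => mv.contains x && !seen.contains x)) := by
  induction data generalizing seen out with
  | nil => simp [PySem.Set.ofList]
  | cons x t ih =>
    simp only [List.foldl_cons]
    by_cases hc : (mv.contains x && !seen.contains x) = true
    · have hf : List.filter (fun y => mv.contains y && !seen.contains y) (x :: t)
          = x :: t.filter (fun y => mv.contains y && !seen.contains y) := by
        simp only [List.filter_cons]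
        rw [if_pos hc]
      rw [if_pos hc, hf, ofList_cons, ih]
      have hxs : PySem.Set.contains seen x = false := by
        obtain ⟨-, h2⟩ := (Bool.and_eq_true _ _).mp hc
        simpa using h2
      have hadd : PySem.Set.add seen x = seen ++ [x] := by
        unfold PySem.Set.add
        rw [if_neg (by rw [hxs]; simp)]
      have hfe : t.filter (fun y => mv.contains y && !(PySem.Set.add seen x).contains y)
          = (t.filter (fun y => mv.contains y && !seen.contains y)).filter (fun y => !(y == x)) := by
        rw [List.filter_filter]
        apply List.filter_congr
        intro y _
        rw [hadd]
        unfold PySem.Set.contains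
        rw [List.contains_append]
        cases h1 : List.contains seen y <;> cases h2 : (y == x) <;>
          cases h3 : PySem.Set.contains mv y <;>
          simp_all [PySem.Set.contains]
      rw [hfe]
      simp
    · have hf : List.filter (fun y => mv.contains y && !seen.contains y) (x :: t)
          = t.filter (fun y => mv.contains y && !seen.contains y) := by
        simp only [List.filter_cons]
        rw [if_neg (by simpa using hc)]
      rw [if_neg hc, hf, ih]

def scanStep (b : Int × Int × PySem.Set Int) (pc : Int × Int) : Int × Int × PySem.Set Int :=
  let r := if pc.2 == pc.1 then b.2.1 + 1 else 1
  if r > b.1 then (r, r, PySem.Set.ofList [pc.2])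
  else if r == b.1 then (b.1, r, PySem.Set.add b.2.2 pc.2)
  else (b.1, r, b.2.2)

def ScanInv (p : List Int) (prev best run : Int) (mv : PySem.Set Int) : Prop :=
  prev ∈ p ∧ (∀ v ∈ p, v ≤ prev) ∧ run = (p.count prev : Int) ∧
  (∀ v ∈ p, (p.count v : Int) ≤ best) ∧ (∃ w ∈ p, (p.count w : Int) = best) ∧
  (∀ v : Int, v ∈ mv ↔ v ∈ p ∧ (p.count v : Int) = best)

theorem step_inv (p : List Int) (cur prev best run : Int) (mv : PySem.Set Int)
    (hple : ∀ v ∈ p, v ≤ cur) (hinv : ScanInv p prev best run mv) :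
    ScanInv (p ++ [cur]) cur (scanStep (best, run, mv) (prev, cur)).1
      (scanStep (best, run, mv) (prev, cur)).2.1 (scanStep (best, run, mv) (prev, cur)).2.2 := by
  obtain ⟨hprev, hmax, hrun, hle, ⟨w, hw, hwb⟩, hmv⟩ := hinv
  have hcount : ∀ v : Int, (p ++ [cur]).count v = p.count v + if cur = v then 1 else 0 := by
    intro v
    rw [List.count_append]
    simp [List.count_cons, beq_iff_eq]
  have hb1 : 1 ≤ best := by
    have := List.count_pos_iff.mpr hw
    have := hwb
    omega
  by_cases heq : cur = prev
  · -- run continues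
    have hstep : scanStep (best, run, mv) (prev, cur)
        = (if run + 1 > best then (run + 1, run + 1, PySem.Set.ofList [cur])
           else if run + 1 == best then (best, run + 1, PySem.Set.add mv cur)
           else (best, run + 1, mv)) := by
      simp [scanStep, heq]
    have hcc : ((p ++ [cur]).count cur : Int) = run + 1 := by
      rw [hcount cur, heq, hrun]; push_cast; omega
    have hco : ∀ v : Int, v ≠ cur → ((p ++ [cur]).count v : Int) = (p.count v : Int) := by
      intro v hv; rw [hcount v, if_neg (fun h => hv h.symm)]; push_cast; omega
    have hmem : ∀ v : Int, v ∈ p ++ [cur] ↔ v ∈ p ∨ v = cur := by simp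
    have hcm : cur ∈ p ++ [cur] := by simp
    have hmx : ∀ v ∈ p ++ [cur], v ≤ cur := by
      intro v hv; rcases (hmem v).mp hv with h | h
      · exact hple v h
      · omega
    by_cases hgt : run + 1 > best
    · rw [hstep, if_pos hgt]
      refine ⟨hcm, hmx, hcc.symm, ?_, ⟨cur, hcm, hcc⟩, ?_⟩
      · intro v hv
        by_cases hvc : v = cur
        · subst hvc; omega
        · rw [hco v hvc]
          have := hle v (by rcases (hmem v).mp hv with h | h; exact h; exact absurd h hvc)
          omega
      · intro v
        constructor
        · intro hvm
          have : v = cur := by simpa [PySem.Set.ofList, PySem.Set.add, PySem.Set.empty] using hvm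
          subst this; exact ⟨hcm, hcc⟩
        · rintro ⟨hvp, hvc⟩
          by_cases hvcur : v = cur
          · subst hvcur; simp [PySem.Set.ofList, PySem.Set.add, PySem.Set.empty]
          · rw [hco v hvcur] at hvc
            have := hle v (by rcases (hmem v).mp hvp with h | h; exact h; exact absurd h hvcur)
            omega
    · have heqb : (run + 1 == best) = (run + 1 == best) := rfl
      by_cases heb : run + 1 = best
      · rw [hstep, if_neg hgt, if_pos (by simpa using heb)]
        refine ⟨hcm, hmx, hcc.symm, ?_, ⟨cur, hcm, by omega⟩, ?_⟩
        · intro v hv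
          by_cases hvc : v = cur
          · subst hvc; omega
          · rw [hco v hvc]
            exact hle v (by rcases (hmem v).mp hv with h | h; exact h; exact absurd h hvc)
        · intro v
          rw [PySem.Set.mem_add]
          constructor
          · rintro (hvm | rfl)
            · obtain ⟨hvp, hvb⟩ := (hmv v).mp hvm
              have hvc : v ≠ cur := by
                rintro rfl
                rw [heq] at hvb; rw [← hrun] at hvb; omega
              exact ⟨by simp [hvp], by rw [hco v hvc]; omega⟩
            · exact ⟨hcm, by omega⟩
          · rintro ⟨hvp, hvb⟩
            by_cases hvc : v = cur
            · right; exact hvc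
            · left
              rw [hco v hvc] at hvb
              exact (hmv v).mpr ⟨by rcases (hmem v).mp hvp with h | h; exact h; exact absurd h hvc, hvb⟩
      · rw [hstep, if_neg hgt, if_neg (by simpa using heb)]
        have hwc : w ≠ cur := by
          rintro rfl
          have : (p.count prev : Int) = best := by rw [← heq]; exact hwb
          omega
        refine ⟨hcm, hmx, hcc.symm, ?_, ⟨w, by simp [hw], by rw [hco w hwc]; exact hwb⟩, ?_⟩
        · intro v hv
          by_cases hvc : v = cur
          · subst hvc; omega
          · rw [hco v hvc]
            exact hle v (by rcases (hmem v).mp hv with h | h; exact h; exact absurd h hvc)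
        · intro v
          rw [hmv v]
          constructor
          · rintro ⟨hvp, hvb⟩
            have hvc : v ≠ cur := by
              rintro rfl
              rw [heq, ← hrun] at hvb; omega
            exact ⟨by simp [hvp], by rw [hco v hvc]; omega⟩
          · rintro ⟨hvp, hvb⟩
            by_cases hvc : v = cur
            · subst hvc; rw [hcc] at hvb; omega
            · rw [hco v hvc] at hvb
              exact ⟨by rcases (hmem v).mp hvp with h | h; exact h; exact absurd h hvc, hvb⟩
  · -- new run of length 1
    have hcurp : cur ∉ p := fun hcp => heq (le_antisymm (hmax cur hcp) (hple prev hprev))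
    have hstep : scanStep (best, run, mv) (prev, cur)
        = (if (1 : Int) > best then ((1 : Int), (1 : Int), PySem.Set.ofList [cur])
           else if (1 : Int) == best then (best, (1 : Int), PySem.Set.add mv cur)
           else (best, (1 : Int), mv)) := by
      simp [scanStep, heq]
    have hcc : ((p ++ [cur]).count cur : Int) = 1 := by
      rw [hcount cur, if_pos rfl, List.count_eq_zero_of_not_mem hcurp]
      norm_num
    have hco : ∀ v : Int, v ≠ cur → ((p ++ [cur]).count v : Int) = (p.count v : Int) := by
      intro v hv; rw [hcount v, if_neg (fun h => hv h.symm)]; push_cast; omega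
    have hmem : ∀ v : Int, v ∈ p ++ [cur] ↔ v ∈ p ∨ v = cur := by simp
    have hcm : cur ∈ p ++ [cur] := by simp
    have hmx : ∀ v ∈ p ++ [cur], v ≤ cur := by
      intro v hv; rcases (hmem v).mp hv with h | h
      · exact hple v h
      · omega
    rw [hstep, if_neg (by omega)]
    by_cases heb : (1 : Int) = best
    · rw [if_pos (by simpa using heb)]
      refine ⟨hcm, hmx, hcc.symm, ?_, ⟨cur, hcm, by omega⟩, ?_⟩
      · intro v hv
        by_cases hvc : v = cur
        · subst hvc; omega
        · rw [hco v hvc]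
          exact hle v (by rcases (hmem v).mp hv with h | h; exact h; exact absurd h hvc)
      · intro v
        rw [PySem.Set.mem_add]
        constructor
        · rintro (hvm | rfl)
          · obtain ⟨hvp, hvb⟩ := (hmv v).mp hvm
            have hvc : v ≠ cur := fun h => hcurp (h ▸ hvp)
            exact ⟨by simp [hvp], by rw [hco v hvc]; omega⟩
          · exact ⟨hcm, by omega⟩
        · rintro ⟨hvp, hvb⟩
          by_cases hvc : v = cur
          · right; exact hvc
          · left
            rw [hco v hvc] at hvb
            exact (hmv v).mpr ⟨by rcases (hmem v).mp hvp with h | h; exact h; exact absurd h hvc, hvb⟩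
    · rw [if_neg (by simpa using heb)]
      have hwc : w ≠ cur := fun h => hcurp (h ▸ hw)
      refine ⟨hcm, hmx, hcc.symm, ?_, ⟨w, by simp [hw], by rw [hco w hwc]; exact hwb⟩, ?_⟩
      · intro v hv
        by_cases hvc : v = cur
        · subst hvc; omega
        · rw [hco v hvc]
          exact hle v (by rcases (hmem v).mp hv with h | h; exact h; exact absurd h hvc)
      · intro v
        rw [hmv v]
        constructor
        · rintro ⟨hvp, hvb⟩
          have hvc : v ≠ cur := fun h => hcurp (h ▸ hvp)
          exact ⟨by simp [hvp], by rw [hco v hvc]; omega⟩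
        · rintro ⟨hvp, hvb⟩
          by_cases hvc : v = cur
          · subst hvc; rw [hcc] at hvb; omega
          · rw [hco v hvc] at hvb
            exact ⟨by rcases (hmem v).mp hvp with h | h; exact h; exact absurd h hvc, hvb⟩

theorem scan_inv (rest : List Int) :
    ∀ (p : List Int) (prev best run : Int) (mv : PySem.Set Int),
    (p ++ rest).Pairwise (· ≤ ·) →
    ScanInv p prev best run mv →
    ∃ prev', ScanInv (p ++ rest) prev'
      (((prev :: rest).zip rest).foldl scanStep (best, run, mv)).1
      (((prev :: rest).zip rest).foldl scanStep (best, run, mv)).2.1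
      (((prev :: rest).zip rest).foldl scanStep (best, run, mv)).2.2 := by
  induction rest with
  | nil => intro p prev best run mv _ hinv; exact ⟨prev, by simpa using hinv⟩
  | cons cur rest' ih =>
    intro p prev best run mv hpw hinv
    have hple : ∀ v ∈ p, v ≤ cur := fun v hv =>
      (List.pairwise_append.mp hpw).2.2 v hv cur List.mem_cons_self
    have hpw' : ((p ++ [cur]) ++ rest').Pairwise (· ≤ ·) := by
      rw [List.append_assoc]; simpa using hpw
    have hstep := step_inv p cur prev best run mv hple hinv
    have hres := ih (p ++ [cur]) cur _ _ _ hpw' hstep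
    rw [List.append_assoc] at hres
    simpa [List.zip_cons_cons] using hres

-- ===== VERDICT (by name: the statement is the Claim_ definition above) =====
theorem mode_stat_spec : Claim_equal_mode_stat := by
  intro data _
  unfold Spec_mode_stat mode_stat mode_stat_alt
  rw [countAppearances_eq_counter]
  have hkeys :
      (PySem.Dict.counter data).keys.foldl
        (fun s key =>
          if (PySem.Dict.counter data).getD key 0 > s.2 then ([key], (PySem.Dict.counter data).getD key 0)
          else if (PySem.Dict.counter data).getD key 0 = s.2 then (s.1 ++ [key], s.2)
          else s) ([], 0)
      = (PySem.Dict.counter data).items.foldl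
          (fun s p =>
            if p.2 > s.2 then ([p.1], p.2)
            else if p.2 = s.2 then (s.1 ++ [p.1], s.2)
            else s) ([], 0) := by
    conv_rhs => rw [PySem.Dict.items_eq_map_keys _ (PySem.Dict.nodup_keys_counter data) 0]
    rw [List.foldl_map]
  rw [hkeys, loopA_eq]
  simp only [ite_self, List.nil_append]
  cases data with
  | nil => rfl
  | cons a t =>
    have hne : (a :: t : List Int) ≠ [] := by simp
    rw [if_neg (show ¬((a :: t : List Int).isEmpty = true) by simp)]
    split
    next hs => exact absurd ((PySem.List.sorted_eq_nil_iff _ _ _).mp hs) hne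
    next s0 stl hs =>
      have hpw : (s0 :: stl).Pairwise (· ≤ ·) := by
        have h := PySem.List.sorted_pairwise (a :: t) (fun x => x)
        rw [hs] at h; simpa using h
      have hperm : (s0 :: stl).Perm (a :: t) := by
        have h := PySem.List.sorted_perm (a :: t) (fun x => x) false
        rw [hs] at h; exact h
      have hbase : ScanInv [s0] s0 1 1 (PySem.Set.ofList [s0]) := by
        refine ⟨by simp, by simp, by simp, by simp, ⟨s0, by simp, by simp⟩, ?_⟩
        intro v
        simp [PySem.Set.ofList, PySem.Set.add, PySem.Set.empty, List.count_singleton]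
        omega
      obtain ⟨pv, hPrev, hMax, hRun, hLe, ⟨w, hw, hwb⟩, hMv⟩ :=
        scan_inv stl [s0] s0 1 1 (PySem.Set.ofList [s0]) (by simpa using hpw) hbase
      rw [show (fun (b : Int × Int × PySem.Set Int) (pc : Int × Int) =>
            let r := if pc.2 == pc.1 then b.2.1 + 1 else 1
            if r > b.1 then (r, r, PySem.Set.ofList [pc.2])
            else if r == b.1 then (b.1, r, PySem.Set.add b.2.2 pc.2)
            else (b.1, r, b.2.2)) = scanStep from rfl]
      rw [loop2_eq]
      simp only [PySem.Set.empty, PySem.Set.contains, List.contains, List.elem_nil,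
        Bool.not_false, Bool.and_true, List.nil_append]
      rw [ofList_filter, PySem.Dict.items_counter, List.filter_map, List.map_map]
      simp only [Function.comp_def, List.map_id']
      simp only [List.singleton_append] at hLe hMv hw hwb
      have hcnt : ∀ v : Int, List.count v (s0 :: stl) = List.count v (a :: t) := fun v => hperm.count_eq v
      have hmemp : ∀ v : Int, v ∈ (s0 :: stl) ↔ v ∈ (a :: t) := fun _ => hperm.mem_iff
      have hM1 : ∀ k ∈ PySem.Set.ofList (a :: t), ((a :: t).count k : Int) ≤
          List.foldl (fun a p => max a p.2) 0
            (List.map (fun k => (k, ((a :: t).count k : Int))) (PySem.Set.ofList (a :: t))) := by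
        intro k hk
        rw [List.foldl_map]
        exact (PySem.List.le_foldl_max_int _ _ 0).2 k hk
      have hMw : ∃ k0 ∈ PySem.Set.ofList (a :: t), ((a :: t).count k0 : Int) =
          List.foldl (fun a p => max a p.2) 0
            (List.map (fun k => (k, ((a :: t).count k : Int))) (PySem.Set.ofList (a :: t))) := by
        have hmm := PySem.List.foldl_max_mem
          (List.map Prod.snd (List.map (fun k => (k, ((a :: t).count k : Int))) (PySem.Set.ofList (a :: t)))) 0
        rw [List.foldl_map] at hmm
        rcases hmm with h0 | hm
        · exfalso
          have ha : (a : Int) ∈ PySem.Set.ofList (a :: t) := (PySem.Set.mem_ofList _ _).mpr List.mem_cons_self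
          have hb := hM1 a ha
          rw [h0] at hb
          have hc : 0 < (a :: t).count a := List.count_pos_iff.mpr List.mem_cons_self
          omega
        · rw [List.mem_map] at hm
          obtain ⟨p, hp, hp2⟩ := hm
          rw [List.mem_map] at hp
          obtain ⟨k0, hk0, rfl⟩ := hp
          exact ⟨k0, hk0, by simpa using hp2⟩
      obtain ⟨k0, hk00, hk0M⟩ := hMw
      have hk0d : k0 ∈ (a :: t) := (PySem.Set.mem_ofList _ _).mp hk00
      have hMF : List.foldl (fun a p => max a p.2) 0
            (List.map (fun k => (k, ((a :: t).count k : Int))) (PySem.Set.ofList (a :: t)))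
          = (List.foldl scanStep (1, 1, PySem.Set.ofList [s0]) ((s0 :: stl).zip stl)).1 := by
        have h1 : ((a :: t).count k0 : Int) ≤
            (List.foldl scanStep (1, 1, PySem.Set.ofList [s0]) ((s0 :: stl).zip stl)).1 := by
          have hb := hLe k0 ((hmemp k0).mpr hk0d)
          rwa [hcnt k0] at hb
        have h2 : ((a :: t).count w : Int) ≤
            List.foldl (fun a p => max a p.2) 0
              (List.map (fun k => (k, ((a :: t).count k : Int))) (PySem.Set.ofList (a :: t))) :=
          hM1 w ((PySem.Set.mem_ofList _ _).mpr ((hmemp w).mp hw))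
        rw [hcnt w] at hwb
        omega
      rw [hMF]
      apply List.filter_congr
      intro k hk
      have hkd : k ∈ (a :: t) := (PySem.Set.mem_ofList _ _).mp hk
      by_cases hkf : ((a :: t).count k : Int) =
          (List.foldl scanStep (1, 1, PySem.Set.ofList [s0]) ((s0 :: stl).zip stl)).1
      · have hin : k ∈ (List.foldl scanStep (1, 1, PySem.Set.ofList [s0]) ((s0 :: stl).zip stl)).2.2 :=
          (hMv k).mpr ⟨(hmemp k).mpr hkd, by rw [hcnt k]; exact hkf⟩
        simp [hkf, hin]
      · have hnin : k ∉ (List.foldl scanStep (1, 1, PySem.Set.ofList [s0]) ((s0 :: stl).zip stl)).2.2 := by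
          intro hin
          have hb := ((hMv k).mp hin).2
          rw [hcnt k] at hb
          exact hkf hb
        simp [hkf, hnin]
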